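-- pv_equiv track=rewrite | github.com/kotekloltrzy/semestr1 | Semestr1/WstepDoProgramowania/zadaniedomowe.py | zad2f
-- ===== SOURCE A (Python) =====
-- def zad2f(z19, z20):
--     odp2f = 0
--     n = z20
--     a = z19
--     for f2 in range(n+1):
--         odp2f += a**2
--         a = a + 1
--     return odp2f
-- ===== SOURCE B (Python) =====
-- def zad2f(z19, z20):
--     # closed form: sum of squares of the z20+1 consecutive integers starting at z19
--     if z20 < 0:
--         return 0
--     def P(m):
--         return m * (m + 1) * (2 * m + 1) // 6
--     return P(z19 + z20) - P(z19 - 1)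
-- ===== Notes on version B (the rewrite author's own statement) =====
-- stated objective: faster
-- what changed: replaces the O(n) accumulation loop by the closed-form sum-of-squares formula (difference of two Faulhaber terms m(m+1)(2m+1)/6), returning 0 when z20 < 0 as the empty loop does
import Mathlib
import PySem

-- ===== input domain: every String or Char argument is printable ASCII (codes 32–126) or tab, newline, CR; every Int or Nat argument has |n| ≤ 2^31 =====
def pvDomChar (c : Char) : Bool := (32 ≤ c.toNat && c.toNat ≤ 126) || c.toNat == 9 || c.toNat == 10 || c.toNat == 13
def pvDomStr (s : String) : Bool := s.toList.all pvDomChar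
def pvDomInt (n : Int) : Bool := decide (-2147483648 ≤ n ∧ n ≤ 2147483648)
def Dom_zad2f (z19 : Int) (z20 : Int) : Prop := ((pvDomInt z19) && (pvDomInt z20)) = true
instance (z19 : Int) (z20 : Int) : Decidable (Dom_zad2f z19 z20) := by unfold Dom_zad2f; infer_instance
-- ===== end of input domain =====

-- B replaces A's O(n) loop by the closed-form sum-of-squares formula (objective: faster, asymptotic).
-- ===== PORT A =====
def zad2f (z19 : Int) (z20 : Int) : Int :=
  -- odp2f = 0; n = z20; a = z19; for f2 in range(n+1): odp2f += a**2; a += 1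
  (((PySem.List.pyRange 0 (z20 + 1) 1).foldl
      (fun (st : Int × Int) (_f2 : Int) => (st.1 + st.2 ^ 2, st.2 + 1))
      (0, z19))).1

-- ===== PORT B =====
-- P(m) = m*(m+1)*(2*m+1) // 6
def pvP (m : Int) : Int := PySem.Int.floordiv (m * (m + 1) * (2 * m + 1)) 6

def zad2f_alt (z19 : Int) (z20 : Int) : Int :=
  if z20 < 0 then 0 else pvP (z19 + z20) - pvP (z19 - 1)

-- ===== PRECONDITION & SPEC =====
def Spec_zad2f (z19 : Int) (z20 : Int) (out : Int) : Prop := out = zad2f_alt z19 z20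
instance (z19 : Int) (z20 : Int) (out : Int) : Decidable (Spec_zad2f z19 z20 out) := by unfold Spec_zad2f; infer_instance

-- ===== CLAIM (what is proved, stated in full; the proofs are below) =====
def Claim_equal_zad2f : Prop := ∀ (z19 : Int) (z20 : Int), Dom_zad2f z19 z20 → Spec_zad2f z19 z20 (zad2f z19 z20)

-- ===== LEMMAS AND PROOFS =====
theorem pv_six_dvd (m : Int) : (6 : Int) ∣ m * (m + 1) * (2 * m + 1) := by
  have h : ∀ x : ZMod 6, x * (x + 1) * (2 * x + 1) = 0 := by decide
  have := (ZMod.intCast_zmod_eq_zero_iff_dvd (m * (m + 1) * (2 * m + 1)) 6).mp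
  apply this
  push_cast
  exact h (m : ZMod 6)

theorem pvP_six (m : Int) : 6 * pvP m = m * (m + 1) * (2 * m + 1) := by
  obtain ⟨c, hc⟩ := pv_six_dvd m
  unfold pvP
  rw [hc, PySem.Int.floordiv_eq_ediv_of_pos (by norm_num : (0:Int) < 6)]
  rw [Int.mul_ediv_cancel_left _ (by norm_num)]

theorem pvP_step (a : Int) : pvP a - pvP (a - 1) = a ^ 2 := by
  have h1 := pvP_six a
  have h2 := pvP_six (a - 1)
  nlinarith [h1, h2]

theorem pv_loop (l : List Int) (odp a : Int) :
    ((l.foldl (fun (st : Int × Int) (_f2 : Int) => (st.1 + st.2 ^ 2, st.2 + 1)) (odp, a))).1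
      = odp + (pvP (a - 1 + l.length) - pvP (a - 1)) := by
  induction l generalizing odp a with
  | nil => simp
  | cons x xs ih =>
    simp only [List.foldl_cons, List.length_cons, ih]
    have h1 : a + 1 - 1 = a := by ring
    rw [h1]
    push_cast
    have h2 : a - 1 + ((xs.length : Int) + 1) = a + (xs.length : Int) := by ring
    rw [h2]
    have := pvP_step a
    omega

-- ===== VERDICT (by name: the statement is the Claim_ definition above) =====
theorem zad2f_spec : Claim_equal_zad2f := by
  intro z19 z20 _
  unfold Spec_zad2f zad2f zad2f_alt
  rw [pv_loop]
  by_cases h : z20 < 0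
  · rw [PySem.List.pyRange_one_eq_nil (by omega)]
    simp [h]
  · have hlen : ((PySem.List.pyRange 0 (z20 + 1) 1).length : Int) = z20 + 1 := by
      rw [PySem.List.length_pyRange_one]; omega
    rw [hlen]
    have : z19 - 1 + (z20 + 1) = z19 + z20 := by ring
    rw [this]
    simp [h]
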